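-- pv_equiv track=rewrite | github.com/Naveen99c/sql | merge.py | scope_selectors
-- ===== SOURCE A (Python) =====
-- def scope_selectors(css: str, scope: str) -> str:
--     result = []
--     i = 0
--     n = len(css)
--     depth = 0
--     buf = ""
--     while i < n:
--         c = css[i]
--         if c == "{":
--             if depth == 0:
--                 selector_list = buf.strip()
--                 buf = ""
--                 if selector_list.startswith("@"):
--                     start = i
--                     depth2 = 1
--                     i += 1
--                     while i < n and depth2 > 0:
--                         if css[i] == "{": depth2 += 1
--                         elif css[i] == "}": depth2 -= 1
--                         i += 1
--                     block = css[start + 1 : i - 1]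
--                     if selector_list.startswith(("@media", "@supports")):
--                         result.append(f"{selector_list} {{{scope_selectors(block, scope)}}}")
--                     else:
--                         result.append(f"{selector_list} {{{block}}}")
--                     continue
--                 parts = []
--                 for sel in selector_list.split(","):
--                     sel = sel.strip()
--                     if not sel:
--                         continue
--                     if sel.startswith(":root") or sel == "*" or sel == "html":
--                         parts.append(sel)
--                     elif sel.startswith("::-webkit-scrollbar"):
--                         parts.append(sel)
--                     elif sel == "body":
--                         parts.append("body.sandbox-open")
--                     else:
--                         parts.append(f"{scope} {sel}")
--                 result.append(", ".join(parts) + " {")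
--                 depth += 1
--                 i += 1
--                 continue
--             else:
--                 buf += c
--                 depth += 1
--         elif c == "}":
--             if depth == 1:
--                 result.append(buf + "}")
--                 buf = ""
--                 depth -= 1
--             else:
--                 buf += c
--                 depth -= 1
--         else:
--             buf += c
--         i += 1
--     return "".join(result)
-- ===== SOURCE B (Python) =====
-- def _split_rules(css):
--     """One pass over css tracking brace depth: cut it into top-level
--     (header, body) rules, keeping body text verbatim."""
--     rules = []
--     depth = 0
--     start = 0
--     body_start = 0
--     header = ""
--     for j, c in enumerate(css):
--         if c == "{":
--             if depth == 0:
--                 header = css[start:j].strip()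
--                 body_start = j + 1
--             depth += 1
--         elif c == "}":
--             depth -= 1
--             if depth == 0:
--                 rules.append((header, css[body_start:j]))
--                 start = j + 1
--     return rules
--
--
-- def _scope_one(sel, scope):
--     if (sel.startswith(":root") or sel == "*" or sel == "html"
--             or sel.startswith("::-webkit-scrollbar")):
--         return sel
--     if sel == "body":
--         return "body.sandbox-open"
--     return f"{scope} {sel}"
--
--
-- def _scope_header(header, scope):
--     sels = (s.strip() for s in header.split(","))
--     return ", ".join(_scope_one(s, scope) for s in sels if s)
--
--
-- def scope_selectors(css: str, scope: str) -> str: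
--     out = []
--     for header, body in _split_rules(css):
--         if header.startswith("@"):
--             inner = scope_selectors(body, scope) if header.startswith(("@media", "@supports")) else body
--             out.append(f"{header} {{{inner}}}")
--         else:
--             out.append(f"{_scope_header(header, scope)} {{{body}}}")
--     return "".join(out)
-- ===== Notes on version B (the rewrite author's own statement) =====
-- stated objective: simpler
-- what changed: B is a two-phase rewrite: one uniform scanner pass tracks brace depth and slices css into a list of top-level (header, body) rules with no per-character buffer accumulation and no separate inner @-rule loop, then a renderer maps each rule to output, recursing only into @media/@supports bodies; Pre_ restricts inputs to css with balanced curly braces (well-formed CSS), since on malformed css with an unclosed rule the two scanners drop or truncate the trailing partial rule differently, a corner no caller would specify.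
-- outside the precondition, e.g. on scope_selectors('a{x', 's'): A returns 's a {', B returns ''; on scope_selectors('@a{xy', 's'): A returns '@a {x}', B returns ''
import Mathlib
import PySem

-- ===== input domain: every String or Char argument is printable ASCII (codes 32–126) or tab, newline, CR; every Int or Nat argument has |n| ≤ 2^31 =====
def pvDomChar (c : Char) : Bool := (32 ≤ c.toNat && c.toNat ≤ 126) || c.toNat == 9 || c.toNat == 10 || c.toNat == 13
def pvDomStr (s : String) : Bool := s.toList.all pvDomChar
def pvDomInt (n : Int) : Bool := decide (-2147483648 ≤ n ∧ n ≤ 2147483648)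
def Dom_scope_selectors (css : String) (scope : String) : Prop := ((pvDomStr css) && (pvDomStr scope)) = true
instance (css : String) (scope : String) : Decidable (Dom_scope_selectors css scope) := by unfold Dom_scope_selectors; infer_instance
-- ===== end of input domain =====

-- B replaces A's char-by-char buffer accumulation and separate @-block skip loop with a
-- two-phase design: one uniform depth-tracking scan into (header, body) rules, then a
-- renderer. Same return value on well-formed (brace-balanced) css; no speed claim.
-- (The 'fuel' parameters below are totality guards only: the loop index/nesting always
-- advances, and each port starts with enough fuel that the guard is never reached.)

-- ===== PORT A =====
-- classification of one stripped selector (A's if/elif chain, in order)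
def aClassify (scope : List Char) (sel : List Char) : List Char :=
  if PySem.Chars.startswith sel (":root".toList) || sel == "*".toList || sel == "html".toList then sel
  else if PySem.Chars.startswith sel ("::-webkit-scrollbar".toList) then sel
  else if sel == "body".toList then "body.sandbox-open".toList
  else scope ++ ' ' :: sel

-- A's 'for sel in selector_list.split(","):' loop building 'parts'
def aParts (scope : List Char) (sels : List (List Char)) (parts : List (List Char)) : List (List Char) :=
  match sels with
  | [] => parts
  | s :: rest =>
    let s' := PySem.Chars.strip s
    if s' == [] then aParts scope rest parts
    else aParts scope rest (parts ++ [aClassify scope s'])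

-- A's inner 'while i < n and depth2 > 0' loop; returns the final i
def aAtScan (css : List Char) (i : Nat) (d : Int) : Nat :=
  if h : i < css.length ∧ 0 < d then
    let c := css[i]'h.1
    aAtScan css (i + 1) (if c = '{' then d + 1 else if c = '}' then d - 1 else d)
  else i
termination_by css.length - i
decreasing_by omega

-- the result/i/depth/buf loop of A's body (fuel-guarded; i advances every iteration)
def aLoop (scope : List Char) (css : List Char) : Nat → Nat → Int →
    List Char → List (List Char) → List Char
  | 0, _, _, _, result => result.flatten
  | fuel + 1, i, depth, buf, result =>
    if i < css.length then
      let c := css[i]!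
      if c = '{' then
        if depth = 0 then
          let sel := PySem.Chars.strip buf
          if PySem.Chars.startswith sel ("@".toList) then
            let i' := aAtScan css (i + 1) 1
            -- block = css[start+1 : i'-1]; both bounds nonnegative, so drop/take is exact
            let block := (css.drop (i + 1)).take ((i' - 1) - (i + 1))
            let inner := if PySem.Chars.startswith sel ("@media".toList)
                            || PySem.Chars.startswith sel ("@supports".toList)
                         then aLoop scope block fuel 0 0 [] [] else block
            aLoop scope css fuel i' 0 [] (result ++ [sel ++ ' ' :: '{' :: inner ++ ['}']])
          else
            aLoop scope css fuel (i + 1) (depth + 1) []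
              (result ++ [PySem.Chars.join (", ".toList) (aParts scope (PySem.Chars.splitOn sel (",".toList)) []) ++ " {".toList])
        else
          aLoop scope css fuel (i + 1) (depth + 1) (buf ++ [c]) result
      else if c = '}' then
        if depth = 1 then
          aLoop scope css fuel (i + 1) (depth - 1) [] (result ++ [buf ++ ['}']])
        else
          aLoop scope css fuel (i + 1) (depth - 1) (buf ++ ['}']) result
      else
        aLoop scope css fuel (i + 1) depth (buf ++ [c]) result
    else result.flatten

def scope_selectors (css : String) (scope : String) : String :=
  String.ofList (aLoop scope.toList css.toList (css.toList.length + 1) 0 0 [] [])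

-- ===== PORT B =====
-- one step of _split_rules' for-loop; the state is (depth, start, body_start, header, rules)
def bStep (css : List Char) :
    (Int × Nat × Nat × List Char × List (List Char × List Char)) → (Char × Nat) →
    (Int × Nat × Nat × List Char × List (List Char × List Char))
  | (d, start, bs, hdr, rules), (c, j) =>
    if c = '{' then
      if d = 0 then
        -- header = css[start:j].strip(); both bounds nonnegative, so drop/take is exact
        (d + 1, start, j + 1, PySem.Chars.strip ((css.drop start).take (j - start)), rules)
      else (d + 1, start, bs, hdr, rules)
    else if c = '}' then
      if d - 1 = 0 then (d - 1, j + 1, bs, hdr, rules ++ [(hdr, (css.drop bs).take (j - bs))])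
      else (d - 1, start, bs, hdr, rules)
    else (d, start, bs, hdr, rules)

-- _split_rules: the fold over enumerate(css) (zipIdx yields the same (char, index) pairs)
def bScan (css : List Char) : List (List Char × List Char) :=
  ((css.zipIdx 0).foldl (bStep css) (0, 0, 0, [], [])).2.2.2.2

-- _scope_one
def bScopeOne (scope : List Char) (sel : List Char) : List Char :=
  if PySem.Chars.startswith sel (":root".toList) || sel == "*".toList || sel == "html".toList
      || PySem.Chars.startswith sel ("::-webkit-scrollbar".toList) then sel
  else if sel == "body".toList then "body.sandbox-open".toList
  else scope ++ ' ' :: sel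

-- _scope_header
def bSelLine (scope : List Char) (sels : List Char) : List Char :=
  PySem.Chars.join (", ".toList)
    ((((PySem.Chars.splitOn sels (",".toList)).map PySem.Chars.strip).filter (fun s => !(s == []))).map
      (bScopeOne scope))

-- scope_selectors of Source B: render the scanned rules, recursing into @media/@supports
-- bodies (fuel-guarded; every rule body is strictly shorter than its css)
def bAlt (scope : List Char) : Nat → List Char → List Char
  | 0, _ => []
  | fuel + 1, css =>
    ((bScan css).map (fun r =>
      if PySem.Chars.startswith r.1 ("@".toList) then
        r.1 ++ ' ' :: '{' ::
          ((if PySem.Chars.startswith r.1 ("@media".toList)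
              || PySem.Chars.startswith r.1 ("@supports".toList)
            then bAlt scope fuel r.2 else r.2) ++ ['}'])
      else
        bSelLine scope r.1 ++ " {".toList ++ r.2 ++ ['}'])).flatten

def scope_selectors_alt (css : String) (scope : String) : String :=
  String.ofList (bAlt scope.toList css.toList.length css.toList)

-- ===== PRECONDITION & SPEC =====
-- the standard balanced-braces (Dyck) predicate: running '{'/'}' depth from d never
-- goes negative and ends at 0
def dyckAux : List Char → Int → Bool
  | [], d => d == 0
  | c :: rest, d =>
    let d' := if c = '{' then d + 1 else if c = '}' then d - 1 else d
    decide (0 ≤ d') && dyckAux rest d'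

-- Pre_ restricts inputs to well-formed CSS whose curly braces are balanced; on malformed
-- css with an unclosed rule the two scanners drop or truncate the trailing partial rule
-- differently, a corner no caller would specify.
def Pre_scope_selectors (css : String) (scope : String) : Prop := dyckAux css.toList 0 = true
instance (css : String) (scope : String) : Decidable (Pre_scope_selectors css scope) := by unfold Pre_scope_selectors; infer_instance

def pvWitness_scope_selectors : String × String := ("body { x } h1, p { y }", ".scope")

def Spec_scope_selectors (css : String) (scope : String) (out : String) : Prop := out = scope_selectors_alt css scope
instance (css : String) (scope : String) (out : String) : Decidable (Spec_scope_selectors css scope out) := by unfold Spec_scope_selectors; infer_instance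

-- ===== CLAIM (what is proved, stated in full; the proofs are below) =====
def Claim_equal_scope_selectors : Prop := ∀ (css : String) (scope : String), Dom_scope_selectors css scope → Pre_scope_selectors css scope → Spec_scope_selectors css scope (scope_selectors css scope)

-- ===== LEMMAS AND PROOFS =====

-- every rule body produced by bScan is strictly shorter than its css (so bAlt's fuel,
-- started at css.length, never runs out)
theorem bStep_inv (css : List Char) (d : Int) (start bs : Nat) (hdr : List Char)
    (rules : List (List Char × List Char)) (c : Char) (j : Nat)
    (hj : j < css.length)
    (h1 : 1 ≤ d → 1 ≤ bs ∧ bs ≤ css.length)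
    (h2 : ∀ h b, (h, b) ∈ rules → b.length < css.length) :
    (1 ≤ (bStep css (d, start, bs, hdr, rules) (c, j)).1 →
      1 ≤ (bStep css (d, start, bs, hdr, rules) (c, j)).2.2.1 ∧
      (bStep css (d, start, bs, hdr, rules) (c, j)).2.2.1 ≤ css.length) ∧
    (∀ h b, (h, b) ∈ (bStep css (d, start, bs, hdr, rules) (c, j)).2.2.2.2 → b.length < css.length) := by
  by_cases hc1 : c = '{'
  · by_cases hd0 : d = 0
    · subst hd0
      have hb : bStep css (0, start, bs, hdr, rules) (c, j)
          = (1, start, j + 1, PySem.Chars.strip ((css.drop start).take (j - start)), rules) := by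
        simp [bStep, hc1]
      rw [hb]
      exact ⟨fun _ => show 1 ≤ j + 1 ∧ j + 1 ≤ css.length from by omega, h2⟩
    · have hb : bStep css (d, start, bs, hdr, rules) (c, j) = (d + 1, start, bs, hdr, rules) := by
        simp [bStep, hc1, hd0]
      rw [hb]
      exact ⟨fun h => h1 (by omega), h2⟩
  · by_cases hc2 : c = '}'
    · by_cases hd1 : d - 1 = 0
      · have hb : bStep css (d, start, bs, hdr, rules) (c, j)
            = (d - 1, j + 1, bs, hdr, rules ++ [(hdr, (css.drop bs).take (j - bs))]) := by
          simp [bStep, hc2, hd1]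
        rw [hb]
        refine ⟨fun h => absurd h (by omega), fun h b hmem => ?_⟩
        rcases List.mem_append.1 hmem with hm | hm
        · exact h2 _ _ hm
        · simp only [List.mem_singleton, Prod.mk.injEq] at hm
          obtain ⟨-, rfl⟩ := hm
          have hbs := h1 (by omega)
          simp only [List.length_take, List.length_drop]
          omega
      · have hb : bStep css (d, start, bs, hdr, rules) (c, j) = (d - 1, start, bs, hdr, rules) := by
          simp [bStep, hc2, hd1]
        rw [hb]
        exact ⟨fun h => h1 (by omega), h2⟩
    · have hb : bStep css (d, start, bs, hdr, rules) (c, j) = (d, start, bs, hdr, rules) := by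
        simp [bStep, hc1, hc2]
      rw [hb]
      exact ⟨fun h => h1 h, h2⟩

theorem bScan_body_length (css : List Char) (hd b : List Char)
    (hm : (hd, b) ∈ bScan css) : b.length < css.length := by
  have hzip : ∀ p ∈ css.zipIdx 0, p.2 < css.length := by
    intro p hp
    have := List.mem_zipIdx hp
    omega
  have hfold : ∀ (l : List (Char × Nat)), (∀ p ∈ l, p.2 < css.length) →
      ∀ (d : Int) (start bs : Nat) (hdr : List Char) (rules : List (List Char × List Char)),
      (1 ≤ d → 1 ≤ bs ∧ bs ≤ css.length) →
      (∀ h b, (h, b) ∈ rules → b.length < css.length) →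
      (1 ≤ (l.foldl (bStep css) (d, start, bs, hdr, rules)).1 →
        1 ≤ (l.foldl (bStep css) (d, start, bs, hdr, rules)).2.2.1 ∧
        (l.foldl (bStep css) (d, start, bs, hdr, rules)).2.2.1 ≤ css.length) ∧
      (∀ h b, (h, b) ∈ (l.foldl (bStep css) (d, start, bs, hdr, rules)).2.2.2.2 → b.length < css.length) := by
    intro l
    induction l with
    | nil => intro _ d start bs hdr rules h1 h2; exact ⟨h1, h2⟩
    | cons p rest ih =>
      intro hp d start bs hdr rules h1 h2
      rcases p with ⟨c, j⟩
      have hj : j < css.length := hp (c, j) (by simp)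
      have hstep := bStep_inv css d start bs hdr rules c j hj h1 h2
      rw [List.foldl_cons]
      rcases e : bStep css (d, start, bs, hdr, rules) (c, j) with ⟨d', start', bs', hdr', rules'⟩
      rw [e] at hstep
      exact ih (fun q hq => hp q (by simp [hq])) d' start' bs' hdr' rules' hstep.1 hstep.2
  unfold bScan at hm
  exact (hfold (css.zipIdx 0) hzip 0 0 0 [] [] (by omega) (by simp)).2 hd b hm

-- bAlt does not depend on the fuel once it covers the css length
theorem bAlt_fuel (scope : List Char) : ∀ f f' css, css.length ≤ f → css.length ≤ f' →
    bAlt scope f css = bAlt scope f' css := by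
  intro f
  induction f with
  | zero =>
    intro f' css hf hf'
    have : css = [] := by
      cases css with
      | nil => rfl
      | cons a l => simp at hf
    subst this
    cases f' with
    | zero => rfl
    | succ g => simp [bAlt, bScan]
  | succ g ih =>
    intro f' css hf hf'
    cases f' with
    | zero =>
      have : css = [] := by
        cases css with
        | nil => rfl
        | cons a l => simp at hf'
      subst this
      simp [bAlt, bScan]
    | succ g' =>
      simp only [bAlt]
      congr 1
      apply List.map_congr_left
      intro r hr
      have hlt : r.2.length < css.length := bScan_body_length css r.1 r.2 (by cases r; exact hr)
      rw [ih g' r.2 (by omega) (by omega)]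

-- the rendering of one rule and of a rule list (proof-side view of bAlt's map-flatten;
-- bAltSem is bAlt at its canonical fuel)
def bAltSem (scope css : List Char) : List Char := bAlt scope css.length css

def rendOne (scope : List Char) (r : List Char × List Char) : List Char :=
  if PySem.Chars.startswith r.1 ("@".toList) then
    r.1 ++ ' ' :: '{' ::
      ((if PySem.Chars.startswith r.1 ("@media".toList)
          || PySem.Chars.startswith r.1 ("@supports".toList)
        then bAltSem scope r.2 else r.2) ++ ['}'])
  else
    bSelLine scope r.1 ++ " {".toList ++ r.2 ++ ['}']

def rend (scope : List Char) (rules : List (List Char × List Char)) : List Char :=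
  rules.flatMap (rendOne scope)

theorem bAltSem_eq_rend (scope css : List Char) : bAltSem scope css = rend scope (bScan css) := by
  cases hcss : css with
  | nil => simp [bAltSem, bAlt, rend, bScan]
  | cons a l =>
    rw [← hcss]
    have hlen : css.length = l.length + 1 := by rw [hcss]; simp
    rw [bAltSem, hlen]
    simp only [bAlt, rend, List.flatMap_def]
    congr 1
    apply List.map_congr_left
    intro r hr
    have hlt : r.2.length < css.length := bScan_body_length css r.1 r.2 (by cases r; exact hr)
    simp only [rendOne, bAltSem]
    rw [bAlt_fuel scope l.length r.2.length r.2 (by omega) (by omega)]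

theorem rend_cons (scope : List Char) (x : List Char × List Char) (l : List (List Char × List Char)) :
    rend scope (x :: l) = rendOne scope x ++ rend scope l := by
  simp [rend]

theorem rend_append (scope : List Char) (l1 l2 : List (List Char × List Char)) :
    rend scope (l1 ++ l2) = rend scope l1 ++ rend scope l2 := by
  simp [rend]

theorem flatten_snoc (l : List (List Char)) (p : List Char) :
    (l ++ [p]).flatten = l.flatten ++ p := by simp

-- the scan run from position i in state st (its rules component)
def bRun (css : List Char) (i : Nat)
    (st : Int × Nat × Nat × List Char × List (List Char × List Char)) :
    List (List Char × List Char) :=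
  (((css.drop i).zipIdx i).foldl (bStep css) st).2.2.2.2

theorem bScan_eq_bRun (css : List Char) : bScan css = bRun css 0 (0, 0, 0, [], []) := by
  simp [bScan, bRun]

theorem bRun_succ (css : List Char) (i : Nat) (h : i < css.length) (st) :
    bRun css i st = bRun css (i + 1) (bStep css st (css[i], i)) := by
  simp only [bRun, List.drop_eq_getElem_cons h, List.zipIdx_cons, List.foldl_cons]

theorem bRun_end (css : List Char) (i : Nat) (h : css.length ≤ i) (st) :
    bRun css i st = st.2.2.2.2 := by
  simp only [bRun, List.drop_eq_nil_of_le h, List.zipIdx_nil, List.foldl_nil]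

-- rules already emitted pass through every later step unchanged
theorem bStep_frame (css : List Char) (d : Int) (start bs : Nat) (hdr : List Char)
    (rules : List (List Char × List Char)) (p : Char × Nat) :
    bStep css (d, start, bs, hdr, rules) p
      = ((bStep css (d, start, bs, hdr, []) p).1, (bStep css (d, start, bs, hdr, []) p).2.1,
         (bStep css (d, start, bs, hdr, []) p).2.2.1, (bStep css (d, start, bs, hdr, []) p).2.2.2.1,
         rules ++ (bStep css (d, start, bs, hdr, []) p).2.2.2.2) := by
  rcases p with ⟨c, j⟩
  simp only [bStep]
  split_ifs <;> simp

theorem foldl_frame (css : List Char) : ∀ (l : List (Char × Nat)) (d : Int) (start bs : Nat)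
    (hdr : List Char) (rules : List (List Char × List Char)),
    l.foldl (bStep css) (d, start, bs, hdr, rules)
      = ((l.foldl (bStep css) (d, start, bs, hdr, [])).1, (l.foldl (bStep css) (d, start, bs, hdr, [])).2.1,
         (l.foldl (bStep css) (d, start, bs, hdr, [])).2.2.1, (l.foldl (bStep css) (d, start, bs, hdr, [])).2.2.2.1,
         rules ++ (l.foldl (bStep css) (d, start, bs, hdr, [])).2.2.2.2) := by
  intro l
  induction l with
  | nil => intro d start bs hdr rules; simp
  | cons p rest ih =>
    intro d start bs hdr rules
    rw [List.foldl_cons, List.foldl_cons, bStep_frame]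
    rcases e : bStep css (d, start, bs, hdr, []) p with ⟨d', start', bs', hdr', rules'⟩
    rw [ih d' start' bs' hdr' (rules ++ rules'), ih d' start' bs' hdr' rules']
    simp

theorem bRun_frame (css : List Char) (i : Nat) (d : Int) (start bs : Nat) (hdr : List Char)
    (rules : List (List Char × List Char)) :
    bRun css i (d, start, bs, hdr, rules) = rules ++ bRun css i (d, start, bs, hdr, []) := by
  simp only [bRun]
  rw [foldl_frame]

theorem aAtScan_ge (css : List Char) (i : Nat) (d : Int) : i ≤ aAtScan css i d := by
  fun_induction aAtScan
  all_goals first | omega | (simp only [dite_eq_ite] at *; omega)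

theorem sl_snoc (css : List Char) (seg i : Nat) (hs : seg ≤ i) (h : i < css.length) :
    (css.drop seg).take (i - seg) ++ [css[i]] = (css.drop seg).take (i + 1 - seg) := by
  rw [show i + 1 - seg = (i - seg) + 1 by omega, List.take_add_one, List.getElem?_drop]
  rw [show seg + (i - seg) = i by omega]
  simp [List.getElem?_eq_getElem h]

theorem sl_snoc' (css : List Char) (seg i : Nat) (c : Char) (hs : seg ≤ i)
    (h : i < css.length) (hc : css[i] = c) :
    (css.drop seg).take (i - seg) ++ [c] = (css.drop seg).take (i + 1 - seg) := by
  rw [← hc]; exact sl_snoc css seg i hs h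

-- A's selector-line computation equals B's
theorem classify_eq (scope sel : List Char) : aClassify scope sel = bScopeOne scope sel := by
  simp only [aClassify, bScopeOne, Bool.or_eq_true]
  split_ifs <;> simp_all

theorem parts_eq (scope : List Char) : ∀ (l : List (List Char)) (parts : List (List Char)),
    aParts scope l parts = parts ++ ((l.map PySem.Chars.strip).filter (fun s => !(s == []))).map (aClassify scope) := by
  intro l
  induction l with
  | nil => intro parts; simp [aParts]
  | cons s rest ih =>
    intro parts
    cases hs : (PySem.Chars.strip s == [])
    · rw [show aParts scope (s :: rest) parts
            = aParts scope rest (parts ++ [aClassify scope (PySem.Chars.strip s)]) from by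
          simp only [aParts, hs]; rfl]
      rw [ih, List.map_cons, List.filter_cons, if_pos (by simp [hs])]
      simp
    · rw [show aParts scope (s :: rest) parts = aParts scope rest parts from by
          simp only [aParts, hs]; rfl]
      rw [ih, List.map_cons, List.filter_cons, if_neg (by simp [hs])]

theorem sel_line_eq (scope sel : List Char) :
    PySem.Chars.join (", ".toList) (aParts scope (PySem.Chars.splitOn sel (",".toList)) [])
      = bSelLine scope sel := by
  rw [parts_eq, bSelLine]
  simp only [List.nil_append]
  congr 1
  apply List.map_congr_left
  intro a _
  exact classify_eq scope a

-- B's scan inside an open block closes it exactly where A's @-skip loop stops, the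
-- closing position is in range, and both the remainder and the block stay balanced
theorem bRun_block (css : List Char) : ∀ k i, css.length - i ≤ k → i ≤ css.length →
    ∀ d : Int, 1 ≤ d → dyckAux (css.drop i) d = true →
    aAtScan css i d ≤ css.length ∧
    dyckAux (css.drop (aAtScan css i d)) 0 = true ∧
    dyckAux ((css.drop i).take ((aAtScan css i d - 1) - i)) (d - 1) = true ∧
    ∀ (start bs : Nat) (hdr : List Char) (rules : List (List Char × List Char)),
      bRun css i (d, start, bs, hdr, rules)
        = rules ++ ((hdr, (css.drop bs).take ((aAtScan css i d - 1) - bs)) ::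
            bRun css (aAtScan css i d) (0, aAtScan css i d, bs, hdr, [])) := by
  intro k
  induction k with
  | zero =>
    intro i hk hi d hd hdy
    exfalso
    have hin : i = css.length := by omega
    rw [hin, List.drop_length] at hdy
    simp only [dyckAux, beq_iff_eq] at hdy
    omega
  | succ k ihk =>
    intro i hk hi d hd hdy
    by_cases hlt : i < css.length
    case neg =>
      exfalso
      rw [List.drop_eq_nil_of_le (by omega)] at hdy
      simp only [dyckAux, beq_iff_eq] at hdy
      omega
    rw [List.drop_eq_getElem_cons hlt] at hdy
    have hunf : aAtScan css i d = aAtScan css (i + 1)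
        (if css[i] = '{' then d + 1 else if css[i] = '}' then d - 1 else d) := by
      rw [aAtScan, dif_pos ⟨hlt, by omega⟩]
    by_cases hc1 : css[i] = '{'
    · simp only [dyckAux] at hdy
      rw [if_pos hc1] at hdy
      simp only [Bool.and_eq_true, decide_eq_true_eq] at hdy
      have hA : aAtScan css i d = aAtScan css (i + 1) (d + 1) := by rw [hunf, if_pos hc1]
      obtain ⟨hle, hdy0, hblk, heq⟩ := ihk (i + 1) (by omega) (by omega) (d + 1) (by omega) hdy.2
      have h2 : i + 2 ≤ aAtScan css (i + 1) (d + 1) := by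
        rcases Nat.lt_or_ge (i + 1) css.length with h | h
        · rw [aAtScan, dif_pos ⟨h, by omega⟩]
          exact aAtScan_ge css (i + 2) _
        · exfalso
          have hdy2 := hdy.2
          rw [List.drop_eq_nil_of_le h] at hdy2
          simp only [dyckAux, beq_iff_eq] at hdy2
          omega
      refine ⟨by rw [hA]; omega, by rw [hA]; exact hdy0, ?_, ?_⟩
      · rw [hA, List.drop_eq_getElem_cons hlt,
          show aAtScan css (i + 1) (d + 1) - 1 - i = (aAtScan css (i + 1) (d + 1) - 1 - (i + 1)) + 1 by omega,
          List.take_succ_cons]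
        simp only [dyckAux]
        rw [if_pos hc1, show d - 1 + 1 = d + 1 - 1 by omega]
        simp only [Bool.and_eq_true, decide_eq_true_eq]
        exact ⟨by omega, hblk⟩
      · intro start bs hdr rules
        have hb : bStep css (d, start, bs, hdr, rules) (css[i], i) = (d + 1, start, bs, hdr, rules) := by
          simp [bStep, hc1, show ¬ d = 0 by omega]
        rw [bRun_succ css i hlt, hb, hA, heq start bs hdr rules]
    · by_cases hc2 : css[i] = '}'
      · by_cases hd1 : d = 1
        · subst hd1
          have hA : aAtScan css i 1 = i + 1 := by
            rw [hunf, if_neg hc1, if_pos hc2, aAtScan, dif_neg (by omega)]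
          simp only [dyckAux] at hdy
          rw [if_neg hc1, if_pos hc2, show (1 : Int) - 1 = 0 by omega] at hdy
          simp only [Bool.and_eq_true, decide_eq_true_eq] at hdy
          refine ⟨by omega, by rw [hA]; exact hdy.2, ?_, ?_⟩
          · rw [hA, show i + 1 - 1 - i = 0 by omega, List.take_zero]
            simp [dyckAux]
          · intro start bs hdr rules
            have hb : bStep css (1, start, bs, hdr, rules) (css[i], i)
                = (0, i + 1, bs, hdr, rules ++ [(hdr, (css.drop bs).take (i - bs))]) := by
              simp [bStep, hc1, hc2]
            rw [bRun_succ css i hlt, hb, hA, bRun_frame,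
              show i + 1 - 1 - bs = i - bs by omega]
            simp
        · have hA : aAtScan css i d = aAtScan css (i + 1) (d - 1) := by
            rw [hunf, if_neg hc1, if_pos hc2]
          simp only [dyckAux] at hdy
          rw [if_neg hc1, if_pos hc2] at hdy
          simp only [Bool.and_eq_true, decide_eq_true_eq] at hdy
          obtain ⟨hle, hdy0, hblk, heq⟩ := ihk (i + 1) (by omega) (by omega) (d - 1) (by omega) hdy.2
          have h2 : i + 2 ≤ aAtScan css (i + 1) (d - 1) := by
            rcases Nat.lt_or_ge (i + 1) css.length with h | h
            · rw [aAtScan, dif_pos ⟨h, by omega⟩]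
              exact aAtScan_ge css (i + 2) _
            · exfalso
              have hdy2 := hdy.2
              rw [List.drop_eq_nil_of_le h] at hdy2
              simp only [dyckAux, beq_iff_eq] at hdy2
              omega
          refine ⟨by rw [hA]; omega, by rw [hA]; exact hdy0, ?_, ?_⟩
          · rw [hA, List.drop_eq_getElem_cons hlt,
              show aAtScan css (i + 1) (d - 1) - 1 - i = (aAtScan css (i + 1) (d - 1) - 1 - (i + 1)) + 1 by omega,
              List.take_succ_cons]
            simp only [dyckAux]
            rw [if_neg hc1, if_pos hc2]
            simp only [Bool.and_eq_true, decide_eq_true_eq]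
            exact ⟨by omega, hblk⟩
          · intro start bs hdr rules
            have hb : bStep css (d, start, bs, hdr, rules) (css[i], i) = (d - 1, start, bs, hdr, rules) := by
              simp [bStep, hc2, show ¬ d - 1 = 0 by omega]
            rw [bRun_succ css i hlt, hb, hA, heq start bs hdr rules]
      · have hA : aAtScan css i d = aAtScan css (i + 1) d := by
          rw [hunf, if_neg hc1, if_neg hc2]
        simp only [dyckAux] at hdy
        rw [if_neg hc1, if_neg hc2] at hdy
        simp only [Bool.and_eq_true, decide_eq_true_eq] at hdy
        obtain ⟨hle, hdy0, hblk, heq⟩ := ihk (i + 1) (by omega) (by omega) d (by omega) hdy.2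
        have h2 : i + 2 ≤ aAtScan css (i + 1) d := by
          rcases Nat.lt_or_ge (i + 1) css.length with h | h
          · rw [aAtScan, dif_pos ⟨h, by omega⟩]
            exact aAtScan_ge css (i + 2) _
          · exfalso
            have hdy2 := hdy.2
            rw [List.drop_eq_nil_of_le h] at hdy2
            simp only [dyckAux, beq_iff_eq] at hdy2
            omega
        refine ⟨by rw [hA]; omega, by rw [hA]; exact hdy0, ?_, ?_⟩
        · rw [hA, List.drop_eq_getElem_cons hlt,
            show aAtScan css (i + 1) d - 1 - i = (aAtScan css (i + 1) d - 1 - (i + 1)) + 1 by omega,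
            List.take_succ_cons]
          simp only [dyckAux]
          rw [if_neg hc1, if_neg hc2]
          simp only [Bool.and_eq_true, decide_eq_true_eq]
          exact ⟨by omega, hblk⟩
        · intro start bs hdr rules
          have hb : bStep css (d, start, bs, hdr, rules) (css[i], i) = (d, start, bs, hdr, rules) := by
            simp [bStep, hc1, hc2]
          rw [bRun_succ css i hlt, hb, hA, heq start bs hdr rules]

-- A's loop and B's scan agree, in both regimes of A's loop state, along balanced input
theorem main_loop (scope : List Char) : ∀ fuel : Nat, ∀ css : List Char, ∀ i,
    i ≤ css.length → css.length - i < fuel →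
    ((dyckAux (css.drop i) 0 = true → ∀ seg, seg ≤ i →
        ∀ (bs : Nat) (hdr : List Char) (result : List (List Char)),
        aLoop scope css fuel i 0 ((css.drop seg).take (i - seg)) result
          = result.flatten ++ rend scope (bRun css i (0, seg, bs, hdr, []))) ∧
     (∀ d : Int, 1 ≤ d → dyckAux (css.drop i) d = true →
        ∀ s, s ≤ i → ∀ (start : Nat) (hdr : List Char),
        PySem.Chars.startswith hdr ("@".toList) = false →
        ∀ result : List (List Char),
        aLoop scope css fuel i d ((css.drop s).take (i - s))
            (result ++ [bSelLine scope hdr ++ " {".toList])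
          = result.flatten ++ rend scope (bRun css i (d, start, s, hdr, [])))) := by
  intro fuel
  induction fuel with
  | zero => intro css i hi hf; omega
  | succ g ihg =>
    intro css i hi hf
    by_cases hlt : i < css.length
    case neg =>
      -- input exhausted: A returns result.flatten, B's scan emits nothing more
      constructor
      · intro _ seg _ bs hdr result
        rw [show aLoop scope css (g + 1) i 0 ((css.drop seg).take (i - seg)) result
              = result.flatten from by rw [aLoop, if_neg (by omega)],
          bRun_end css i (by omega)]
        simp [rend]
      · intro d hd hdy s _ start hdr _ result
        exfalso
        rw [List.drop_eq_nil_of_le (by omega)] at hdy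
        simp only [dyckAux, beq_iff_eq] at hdy
        omega
    have hgx : css[i]! = css[i] := getElem!_pos css i hlt
    constructor
    · -- top level: depth 0, between rules
      intro hdy seg hseg bs hdr result
      rw [List.drop_eq_getElem_cons hlt] at hdy
      by_cases hc1 : css[i] = '{'
      · simp only [dyckAux] at hdy
        rw [if_pos hc1] at hdy
        simp only [Bool.and_eq_true, decide_eq_true_eq] at hdy
        have hdy1 : dyckAux (css.drop (i + 1)) 1 = true := by
          have := hdy.2
          norm_num at this
          exact this
        by_cases hat : PySem.Chars.startswith (PySem.Chars.strip ((css.drop seg).take (i - seg))) ['@']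
        · -- @-rule
          obtain ⟨hle, hdy0, hblk, heq⟩ :=
            bRun_block css (css.length - (i + 1)) (i + 1) le_rfl (by omega) 1 le_rfl hdy1
          have hge : i + 1 ≤ aAtScan css (i + 1) 1 := aAtScan_ge css (i + 1) 1
          have hblen : ((css.drop (i + 1)).take ((aAtScan css (i + 1) 1 - 1) - (i + 1))).length < css.length - i := by
            simp only [List.length_take, List.length_drop]
            omega
          have hblock : aLoop scope ((css.drop (i + 1)).take ((aAtScan css (i + 1) 1 - 1) - (i + 1))) g 0 0 [] []
              = bAltSem scope ((css.drop (i + 1)).take ((aAtScan css (i + 1) 1 - 1) - (i + 1))) := by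
            have h0 := (ihg ((css.drop (i + 1)).take ((aAtScan css (i + 1) 1 - 1) - (i + 1))) 0
              (by omega) (by omega)).1 (by simpa using hblk) 0 le_rfl 0 [] []
            simp only [Nat.sub_self, List.take_zero, List.flatten_nil, List.nil_append] at h0
            rw [h0, ← bScan_eq_bRun, ← bAltSem_eq_rend]
          have hA : aLoop scope css (g + 1) i 0 ((css.drop seg).take (i - seg)) result
              = aLoop scope css g (aAtScan css (i + 1) 1) 0 []
                  (result ++ [PySem.Chars.strip ((css.drop seg).take (i - seg)) ++ ' ' :: '{' ::
                    (if PySem.Chars.startswith (PySem.Chars.strip ((css.drop seg).take (i - seg))) ("@media".toList)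
                        || PySem.Chars.startswith (PySem.Chars.strip ((css.drop seg).take (i - seg))) ("@supports".toList)
                     then aLoop scope ((css.drop (i + 1)).take ((aAtScan css (i + 1) 1 - 1) - (i + 1))) g 0 0 [] []
                     else ((css.drop (i + 1)).take ((aAtScan css (i + 1) 1 - 1) - (i + 1)))) ++ ['}']]) := by
            rw [aLoop, if_pos hlt]
            simp [hgx, hc1, hat]
          have hb : bStep css (0, seg, bs, hdr, []) (css[i], i)
              = (1, seg, i + 1, PySem.Chars.strip ((css.drop seg).take (i - seg)), []) := by
            simp [bStep, hc1]
          have hB := ((ihg css (aAtScan css (i + 1) 1) hle (by omega)).1 hdy0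
            (aAtScan css (i + 1) 1) le_rfl (i + 1)
            (PySem.Chars.strip ((css.drop seg).take (i - seg)))
            (result ++ [PySem.Chars.strip ((css.drop seg).take (i - seg)) ++ ' ' :: '{' ::
              (if PySem.Chars.startswith (PySem.Chars.strip ((css.drop seg).take (i - seg))) ("@media".toList)
                  || PySem.Chars.startswith (PySem.Chars.strip ((css.drop seg).take (i - seg))) ("@supports".toList)
               then aLoop scope ((css.drop (i + 1)).take ((aAtScan css (i + 1) 1 - 1) - (i + 1))) g 0 0 [] []
               else ((css.drop (i + 1)).take ((aAtScan css (i + 1) 1 - 1) - (i + 1)))) ++ ['}']]))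
          rw [Nat.sub_self, List.take_zero] at hB
          rw [hA, hB, bRun_succ css i hlt, hb,
            heq seg (i + 1) (PySem.Chars.strip ((css.drop seg).take (i - seg))) []]
          rw [List.nil_append, rend_cons, flatten_snoc]
          rw [hblock]
          simp [rendOne, hat]
        · -- ordinary rule: emit the selector line, switch to the in-rule regime
          have hA : aLoop scope css (g + 1) i 0 ((css.drop seg).take (i - seg)) result
              = aLoop scope css g (i + 1) 1 []
                  (result ++ [PySem.Chars.join (", ".toList)
                      (aParts scope (PySem.Chars.splitOn (PySem.Chars.strip ((css.drop seg).take (i - seg))) (",".toList)) [])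
                    ++ " {".toList]) := by
            rw [aLoop, if_pos hlt]
            simp [hgx, hc1, hat]
          rw [sel_line_eq] at hA
          have hb : bStep css (0, seg, bs, hdr, []) (css[i], i)
              = (1, seg, i + 1, PySem.Chars.strip ((css.drop seg).take (i - seg)), []) := by
            simp [bStep, hc1]
          have hB := (ihg css (i + 1) (by omega) (by omega)).2 1 le_rfl hdy1 (i + 1) le_rfl seg
            (PySem.Chars.strip ((css.drop seg).take (i - seg)))
            (by simpa using hat) result
          rw [Nat.sub_self, List.take_zero] at hB
          rw [hA, hB, bRun_succ css i hlt, hb]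
      · by_cases hc2 : css[i] = '}'
        · exfalso
          simp only [dyckAux] at hdy
          rw [if_neg hc1, if_pos hc2] at hdy
          simp only [Bool.and_eq_true, decide_eq_true_eq] at hdy
          omega
        · have hdy' : dyckAux (css.drop (i + 1)) 0 = true := by
            simp only [dyckAux] at hdy
            rw [if_neg hc1, if_neg hc2] at hdy
            simp only [Bool.and_eq_true, decide_eq_true_eq] at hdy
            exact hdy.2
          have hA : aLoop scope css (g + 1) i 0 ((css.drop seg).take (i - seg)) result
              = aLoop scope css g (i + 1) 0 ((css.drop seg).take (i + 1 - seg)) result := by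
            rw [aLoop, if_pos hlt]
            simp [hgx, hc1, hc2, sl_snoc' css seg i (css[i]) hseg hlt rfl]
          have hb : bStep css (0, seg, bs, hdr, []) (css[i], i) = (0, seg, bs, hdr, []) := by
            simp [bStep, hc1, hc2]
          rw [hA, bRun_succ css i hlt, hb]
          exact (ihg css (i + 1) (by omega) (by omega)).1 hdy' seg (by omega) bs hdr result
    · -- inside an ordinary (non-@) rule body: depth ≥ 1
      intro d hd hdy s hs start hdr hat result
      rw [List.drop_eq_getElem_cons hlt] at hdy
      by_cases hc1 : css[i] = '{'
      · simp only [dyckAux] at hdy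
        rw [if_pos hc1] at hdy
        simp only [Bool.and_eq_true, decide_eq_true_eq] at hdy
        have hA : aLoop scope css (g + 1) i d ((css.drop s).take (i - s))
              (result ++ [bSelLine scope hdr ++ " {".toList])
            = aLoop scope css g (i + 1) (d + 1) ((css.drop s).take (i + 1 - s))
              (result ++ [bSelLine scope hdr ++ " {".toList]) := by
          rw [aLoop, if_pos hlt]
          simp [hgx, hc1, show ¬ d = 0 by omega, sl_snoc' css s i '{' hs hlt hc1]
        have hb : bStep css (d, start, s, hdr, []) (css[i], i) = (d + 1, start, s, hdr, []) := by
          simp [bStep, hc1, show ¬ d = 0 by omega]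
        rw [hA, bRun_succ css i hlt, hb]
        exact (ihg css (i + 1) (by omega) (by omega)).2 (d + 1) (by omega) hdy.2 s (by omega)
          start hdr hat result
      · by_cases hc2 : css[i] = '}'
        · simp only [dyckAux] at hdy
          rw [if_neg hc1, if_pos hc2] at hdy
          simp only [Bool.and_eq_true, decide_eq_true_eq] at hdy
          by_cases hd1 : d = 1
          · subst hd1
            have hdy1 : dyckAux (css.drop (i + 1)) 0 = true := by
              have := hdy.2
              norm_num at this
              exact this
            have hA : aLoop scope css (g + 1) i 1 ((css.drop s).take (i - s))
                  (result ++ [bSelLine scope hdr ++ " {".toList])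
                = aLoop scope css g (i + 1) 0 []
                  ((result ++ [bSelLine scope hdr ++ " {".toList]) ++ [(css.drop s).take (i - s) ++ ['}']]) := by
              rw [aLoop, if_pos hlt]
              simp [hgx, hc1, hc2]
            have hb : bStep css (1, start, s, hdr, []) (css[i], i)
                = (0, i + 1, s, hdr, [(hdr, (css.drop s).take (i - s))]) := by
              simp [bStep, hc1, hc2]
            have hB := (ihg css (i + 1) (by omega) (by omega)).1 hdy1 (i + 1) le_rfl s hdr
              ((result ++ [bSelLine scope hdr ++ " {".toList]) ++ [(css.drop s).take (i - s) ++ ['}']])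
            rw [Nat.sub_self, List.take_zero] at hB
            rw [hA, hB, bRun_succ css i hlt, hb,
              bRun_frame css (i + 1) 0 (i + 1) s hdr [(hdr, (css.drop s).take (i - s))], rend_append]
            have hat' : PySem.Chars.startswith hdr ['@'] = false := by simpa using hat
            simp [rend, rendOne, hat']
          · have hA : aLoop scope css (g + 1) i d ((css.drop s).take (i - s))
                  (result ++ [bSelLine scope hdr ++ " {".toList])
                = aLoop scope css g (i + 1) (d - 1) ((css.drop s).take (i + 1 - s))
                  (result ++ [bSelLine scope hdr ++ " {".toList]) := by
              rw [aLoop, if_pos hlt]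
              simp [hgx, hc1, hc2, hd1, sl_snoc' css s i '}' hs hlt hc2]
            have hb : bStep css (d, start, s, hdr, []) (css[i], i) = (d - 1, start, s, hdr, []) := by
              simp [bStep, hc2, show ¬ d - 1 = 0 by omega]
            rw [hA, bRun_succ css i hlt, hb]
            exact (ihg css (i + 1) (by omega) (by omega)).2 (d - 1) (by omega) hdy.2 s (by omega)
              start hdr hat result
        · simp only [dyckAux] at hdy
          rw [if_neg hc1, if_neg hc2] at hdy
          simp only [Bool.and_eq_true, decide_eq_true_eq] at hdy
          have hA : aLoop scope css (g + 1) i d ((css.drop s).take (i - s))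
                (result ++ [bSelLine scope hdr ++ " {".toList])
              = aLoop scope css g (i + 1) d ((css.drop s).take (i + 1 - s))
                (result ++ [bSelLine scope hdr ++ " {".toList]) := by
            rw [aLoop, if_pos hlt]
            simp [hgx, hc1, hc2, sl_snoc' css s i (css[i]) hs hlt rfl]
          have hb : bStep css (d, start, s, hdr, []) (css[i], i) = (d, start, s, hdr, []) := by
            simp [bStep, hc1, hc2]
          rw [hA, bRun_succ css i hlt, hb]
          exact (ihg css (i + 1) (by omega) (by omega)).2 d hd hdy.2 s (by omega) start hdr hat result

-- ===== VERDICT (by name: the statement is the Claim_ definition above) =====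
theorem scope_selectors_spec : Claim_equal_scope_selectors := by
  intro css scope _ hpre
  unfold Spec_scope_selectors scope_selectors scope_selectors_alt
  have h0 := (main_loop scope.toList (css.toList.length + 1) css.toList 0
    (by omega) (by omega)).1 (by simpa using hpre) 0 le_rfl 0 [] []
  simp only [Nat.sub_self, List.take_zero, List.flatten_nil, List.nil_append] at h0
  rw [h0, ← bScan_eq_bRun, ← bAltSem_eq_rend, bAltSem]
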